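-- pv_equiv track=rewrite | github.com/AlbMej/CSE-2050-Data-Structures-and-Object-Oriented-Design | Homeworks/HW 07_ Finding the Biggest Slice Starter Code/slicesum.py | suffix
-- ===== SOURCE A (Python) =====
-- def suffix(L,low = None, high= None):
-- 	if low is None and high is None:
-- 		low, high = 0, len(L)
-- 	right_sum = 0
-- 	right_total = 0
-- 	right_index = 0
-- 	for j in range(high,low-1,-1):
-- 		right_total = sum(L[j:high])
-- 		if right_total >= right_sum:
-- 			right_sum, right_index = right_total, j
-- 	return (right_sum,right_index)
-- ===== SOURCE B (Python) =====
-- def suffix(L, low=None, high=None):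
--     # Prefix-sum table: each slice sum is a difference of two prefix sums.
--     if low is None and high is None:
--         low, high = 0, len(L)
--     P = [0]
--     acc = 0
--     for x in L:
--         acc += x
--         P.append(acc)
--
--     def seg(a, b):
--         # sum(L[a:b]) via the prefix table
--         s, e, _ = slice(a, b).indices(len(L))
--         return P[e] - P[s] if s < e else 0
--
--     best_sum, best_index = 0, 0
--     for j in range(high, low - 1, -1):
--         t = seg(j, high)
--         if t >= best_sum:
--             best_sum, best_index = t, j
--     return (best_sum, best_index)
-- ===== Notes on version B (the rewrite author's own statement) =====
-- stated objective: alternative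
-- what changed: A recomputes sum(L[j:high]) from scratch for every j; B builds a prefix-sum table once and evaluates each slice sum as a prefix difference (bounds normalised by the standard library's slice.indices); Pre_ excludes only the inputs where A raises TypeError (exactly one of low/high is None).
import Mathlib
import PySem

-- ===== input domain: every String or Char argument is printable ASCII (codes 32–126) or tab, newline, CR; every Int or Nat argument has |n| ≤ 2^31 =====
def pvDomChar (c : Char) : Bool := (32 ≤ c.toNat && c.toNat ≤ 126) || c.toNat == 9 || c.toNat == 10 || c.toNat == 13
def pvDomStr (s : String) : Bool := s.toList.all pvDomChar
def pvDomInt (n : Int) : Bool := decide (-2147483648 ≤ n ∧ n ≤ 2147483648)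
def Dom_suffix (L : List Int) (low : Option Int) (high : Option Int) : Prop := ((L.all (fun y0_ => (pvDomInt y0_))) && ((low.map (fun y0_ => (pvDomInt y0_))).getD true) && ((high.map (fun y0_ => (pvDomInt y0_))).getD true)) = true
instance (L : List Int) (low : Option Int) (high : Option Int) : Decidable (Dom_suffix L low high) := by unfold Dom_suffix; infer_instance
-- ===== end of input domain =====

-- ===== PORT A =====
-- B computes each slice sum as a difference of two entries of a prefix-sum table
-- built once, instead of A's re-summing of the slice; return value only, no argument is mutated.
def suffix (L : List Int) (low : Option Int) (high : Option Int) : Int × Int :=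
  let lh : Int × Int :=
    match low, high with
    | none, none => (0, (L.length : Int))
    | lo?, hi? => (lo?.getD 0, hi?.getD 0)
  let lo := lh.1
  let hi := lh.2
  (PySem.List.pyRange hi (lo - 1) (-1)).foldl
    (fun st j =>
      let rt := (PySem.List.slice L (some j) (some hi)).sum
      if rt ≥ st.1 then (rt, j) else st)
    (0, 0)

-- ===== PORT B =====
-- Source B's prefix table P ([0]; acc += x; P.append(acc))
def pvPrefix (L : List Int) : List Int :=
  (L.foldl (fun (st : List Int × Int) x => (st.1 ++ [st.2 + x], st.2 + x)) ([0], 0)).1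

-- Source B's `seg`: slice(a,b).indices(len(L)) is PySem.List.clampIdx on each bound
def pvSeg (L P : List Int) (a b : Int) : Int :=
  let s := PySem.List.clampIdx L.length a
  let e := PySem.List.clampIdx L.length b
  if s < e then (PySem.List.pyGet? P (e : Int)).getD 0 - (PySem.List.pyGet? P (s : Int)).getD 0
  else 0

def suffix_alt (L : List Int) (low : Option Int) (high : Option Int) : Int × Int :=
  let lh : Int × Int :=
    if low.isNone && high.isNone then (0, (L.length : Int))
    else (low.getD 0, high.getD 0)
  let lo := lh.1
  let hi := lh.2
  let P := pvPrefix L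
  (PySem.List.pyRange hi (lo - 1) (-1)).foldl
    (fun st j =>
      let t := pvSeg L P j hi
      if t ≥ st.1 then (t, j) else st)
    (0, 0)

-- ===== PRECONDITION & SPEC =====
-- Pre_ excludes exactly the inputs where Python A raises TypeError: exactly one of
-- low/high is None (then `low - 1` or `range(high, ...)` mixes None with int).
def Pre_suffix (L : List Int) (low : Option Int) (high : Option Int) : Prop :=
  (low = none ∧ high = none) ∨ (low ≠ none ∧ high ≠ none)
instance (L : List Int) (low : Option Int) (high : Option Int) : Decidable (Pre_suffix L low high) := by unfold Pre_suffix; infer_instance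
def pvWitness_suffix : List Int × Option Int × Option Int := ([1, -2, 3], none, none)

def Spec_suffix (L : List Int) (low : Option Int) (high : Option Int) (out : Int × Int) : Prop := out = suffix_alt L low high
instance (L : List Int) (low : Option Int) (high : Option Int) (out : Int × Int) : Decidable (Spec_suffix L low high out) := by unfold Spec_suffix; infer_instance

-- ===== CLAIM (what is proved, stated in full; the proofs are below) =====
def Claim_equal_suffix : Prop := ∀ (L : List Int) (low : Option Int) (high : Option Int), Dom_suffix L low high → Pre_suffix L low high → Spec_suffix L low high (suffix L low high)

-- ===== LEMMAS AND PROOFS =====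

lemma pvPrefix_aux (L : List Int) : ∀ (P0 : List Int) (c : Int),
    (L.foldl (fun (st : List Int × Int) x => (st.1 ++ [st.2 + x], st.2 + x)) (P0, c)).1
      = P0 ++ (List.range L.length).map (fun k => c + (L.take (k + 1)).sum) := by
  induction L with
  | nil => intro P0 c; simp
  | cons x xs ih =>
    intro P0 c
    simp only [List.foldl_cons, ih, List.length_cons, List.range_succ_eq_map,
      List.map_cons, List.map_map]
    simp [Function.comp, List.append_assoc, add_assoc]

lemma pvPrefix_eq (L : List Int) :
    pvPrefix L = (List.range (L.length + 1)).map (fun k => (L.take k).sum) := by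
  unfold pvPrefix
  rw [pvPrefix_aux L [0] 0]
  rw [List.range_succ_eq_map, List.map_cons, List.map_map]
  simp [Function.comp]

lemma pvPrefix_get (L : List Int) (t : Int) (h0 : 0 ≤ t) (hn : t ≤ (L.length : Int)) :
    (PySem.List.pyGet? (pvPrefix L) t).getD 0 = (L.take t.toNat).sum := by
  rw [pvPrefix_eq, PySem.List.pyGet?_of_nonneg _ h0]
  have ht : t.toNat < L.length + 1 := by omega
  rw [List.getElem?_map, List.getElem?_range ht]
  rfl

lemma pv_sum_take_drop (L : List Int) (a k : Nat) :
    ((L.drop a).take k).sum = (L.take (a + k)).sum - (L.take a).sum := by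
  rw [List.take_add, List.sum_append]
  ring

-- A's slice sum equals B's prefix-difference value, for every pair of bounds
lemma pvSeg_eq (L : List Int) (j hi : Int) :
    (PySem.List.slice L (some j) (some hi)).sum = pvSeg L (pvPrefix L) j hi := by
  unfold pvSeg
  set a := PySem.List.clampIdx L.length j with ha
  set b := PySem.List.clampIdx L.length hi with hb
  have hslice : PySem.List.slice L (some j) (some hi) = (L.drop a).take (b - a) := by
    simp [PySem.List.slice, ← ha, ← hb]
  rw [hslice]
  have hbn : b ≤ L.length := PySem.List.clampIdx_le _ _
  have han : a ≤ L.length := PySem.List.clampIdx_le _ _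
  by_cases hab : a < b
  · rw [if_pos hab]
    rw [pv_sum_take_drop]
    rw [pvPrefix_get L _ (by positivity) (by exact_mod_cast hbn),
        pvPrefix_get L _ (by positivity) (by exact_mod_cast han)]
    have : a + (b - a) = b := by omega
    rw [this]
    simp
  · rw [if_neg hab]
    have : b - a = 0 := by omega
    simp [this]

-- the two folds are the same fold: the step functions agree pointwise
lemma pv_main (L : List Int) (lo hi : Int) :
    ((PySem.List.pyRange hi (lo - 1) (-1)).foldl
      (fun (st : Int × Int) j =>
        let rt := (PySem.List.slice L (some j) (some hi)).sum
        if rt ≥ st.1 then (rt, j) else st) (0, 0))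
    = ((PySem.List.pyRange hi (lo - 1) (-1)).foldl
      (fun (st : Int × Int) j =>
        let t := pvSeg L (pvPrefix L) j hi
        if t ≥ st.1 then (t, j) else st) (0, 0)) := by
  have h : (fun (st : Int × Int) j =>
        let rt := (PySem.List.slice L (some j) (some hi)).sum
        if rt ≥ st.1 then (rt, j) else st)
      = (fun (st : Int × Int) j =>
        let t := pvSeg L (pvPrefix L) j hi
        if t ≥ st.1 then (t, j) else st) := by
    funext st j
    simp only [pvSeg_eq]
  rw [h]

-- ===== VERDICT (by name: the statement is the Claim_ definition above) =====
theorem suffix_spec : Claim_equal_suffix := by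
  intro L low high _hdom hpre
  unfold Spec_suffix suffix suffix_alt
  rcases hpre with ⟨hl, hh⟩ | ⟨hl, hh⟩
  · subst hl; subst hh
    exact pv_main L 0 (L.length : Int)
  · cases low with
    | none => exact absurd rfl hl
    | some lo =>
      cases high with
      | none => exact absurd rfl hh
      | some hi =>
        exact pv_main L lo hi
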